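-- pv_equiv track=rewrite | github.com/majoryinca/Demo | rolldice_demo.py | find_single_max_exists
-- ===== SOURCE A (Python) =====
-- def find_single_max_exists(score_list):
--     max_val = max(score_list)
--     count = 0
--     for s in score_list:
--         if s == max_val:
--             count += 1
--     if count > 1:
--         return False
--     else:
--         return True
-- ===== SOURCE B (Python) =====
-- def find_single_max_exists(score_list):
--     # One pass tracking the largest (hi) and second-largest (lo) values seen;
--     # the maximum is unique iff the second-largest is absent or strictly smaller.
--     hi = None
--     lo = None
--     for s in score_list:
--         if hi is None or s > hi:
--             lo = hi
--             hi = s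
--         elif lo is None or s > lo:
--             lo = s
--     if hi is None:
--         raise ValueError("max() arg is an empty sequence")
--     return lo is None or lo < hi
-- ===== Notes on version B (the rewrite author's own statement) =====
-- stated objective: alternative
-- what changed: B replaces A's max()-then-count double pass by a single pass that tracks the largest and second-largest values and decides uniqueness by comparing them.
import Mathlib
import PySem

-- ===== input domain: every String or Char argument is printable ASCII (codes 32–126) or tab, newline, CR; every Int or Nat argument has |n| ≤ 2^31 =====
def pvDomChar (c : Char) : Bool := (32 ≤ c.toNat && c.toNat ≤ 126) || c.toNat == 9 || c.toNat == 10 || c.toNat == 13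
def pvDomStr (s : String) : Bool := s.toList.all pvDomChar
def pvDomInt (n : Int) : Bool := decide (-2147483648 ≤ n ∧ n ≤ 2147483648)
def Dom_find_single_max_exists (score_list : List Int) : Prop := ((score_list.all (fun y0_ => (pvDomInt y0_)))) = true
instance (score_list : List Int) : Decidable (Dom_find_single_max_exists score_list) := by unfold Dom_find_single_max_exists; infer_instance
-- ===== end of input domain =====

-- B is an alternative one-pass algorithm (track largest and second-largest) with the same cost;
-- equivalence is proved for nonempty lists (A raises ValueError on [], excluded by Pre_).

-- ===== PORT A =====
-- max(score_list), then count occurrences of the max; True iff count ≤ 1.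
def find_single_max_exists (score_list : List Int) : Bool :=
  match PySem.List.max? score_list (fun x => x) with
  | none => false  -- Python raises ValueError here; excluded by Pre_
  | some max_val =>
    let count : Int := score_list.foldl (fun c s => if s = max_val then c + 1 else c) 0
    if count > 1 then false else true

-- ===== PORT B =====
-- loop body of Source B: state (hi, lo) = (largest so far, second-largest so far)
def pvStepB (p : Option Int × Option Int) (s : Int) : Option Int × Option Int :=
  match p with
  | (none, _) => (some s, none)          -- hi is None: lo := hi (= None); hi := s
  | (some h, lo) =>
    if h < s then (some s, some h)       -- s > hi: lo := hi; hi := s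
    else
      match lo with
      | none => (some h, some s)         -- lo is None: lo := s
      | some l => if l < s then (some h, some s) else (some h, some l)

def find_single_max_exists_alt (score_list : List Int) : Bool :=
  match score_list.foldl pvStepB (none, none) with
  | (none, _) => false                   -- hi is None: Python raises ValueError; excluded by Pre_
  | (some _, none) => true               -- lo is None
  | (some h, some l) => decide (l < h)

-- ===== PRECONDITION & SPEC =====
-- A raises ValueError on the empty list (max([])), so Pre_ excludes exactly [].
def Pre_find_single_max_exists (score_list : List Int) : Prop := score_list ≠ []
instance (score_list : List Int) : Decidable (Pre_find_single_max_exists score_list) := by unfold Pre_find_single_max_exists; infer_instance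
def pvWitness_find_single_max_exists : List Int := [3, 1, 3]

def Spec_find_single_max_exists (score_list : List Int) (out : Bool) : Prop := out = find_single_max_exists_alt score_list
instance (score_list : List Int) (out : Bool) : Decidable (Spec_find_single_max_exists score_list out) := by unfold Spec_find_single_max_exists; infer_instance

-- ===== CLAIM (what is proved, stated in full; the proofs are below) =====
def Claim_equal_find_single_max_exists : Prop := ∀ (score_list : List Int), Dom_find_single_max_exists score_list → Pre_find_single_max_exists score_list → Spec_find_single_max_exists score_list (find_single_max_exists score_list)

-- ===== LEMMAS AND PROOFS =====

-- proof-only helper: the final decision Source B takes on a loop state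
def pvFin : Option Int × Option Int → Bool
  | (none, _) => false
  | (some _, none) => true
  | (some h, some l) => decide (l < h)

-- A's counting loop is List.count
lemma countA_eq (l : List Int) (m : Int) : ∀ c : Int,
    l.foldl (fun c s => if s = m then c + 1 else c) c = c + (l.count m : Int) := by
  induction l with
  | nil => intro c; simp
  | cons x t ih =>
    intro c
    by_cases hx : x = m
    · simp [List.foldl, hx, ih]; ring
    · simp [List.foldl, hx, ih]

lemma le_foldl_max (l : List Int) : ∀ m : Int, m ≤ l.foldl max m := by
  induction l with
  | nil => intro m; simp
  | cons x t ih => intro m; exact le_trans (le_max_left m x) (ih (max m x))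

-- B's loop, characterized against the running max and the count of the max
lemma loopB (l : List Int) : ∀ (m : Int) (lo : Option Int), (∀ v, lo = some v → v ≤ m) →
    pvFin (l.foldl pvStepB (some m, lo)) =
      (if m < l.foldl max m then decide (l.count (l.foldl max m) = 1)
       else pvFin (some m, lo) && decide (l.count m = 0)) := by
  induction l with
  | nil => intro m lo _; simp
  | cons s t ih =>
    intro m lo hlo
    by_cases hms : m < s
    · -- s > hi
      have hmax : max m s = s := max_eq_right (le_of_lt hms)
      have hsM : s ≤ t.foldl max s := le_foldl_max t s
      have hstep : pvStepB (some m, lo) s = (some s, some m) := by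
        simp [pvStepB, hms]
      rw [List.foldl_cons, hstep, ih s (some m) (by intro v hv; cases hv; exact le_of_lt hms),
          List.foldl_cons, hmax]
      by_cases hsM' : s < t.foldl max s
      · have hne : s ≠ t.foldl max s := ne_of_lt hsM'
        have hmlt : m < t.foldl max s := lt_trans hms hsM'
        simp [hsM', hmlt, hne]
      · have heq : t.foldl max s = s := le_antisymm (not_lt.mp hsM') hsM
        simp [heq, hms, pvFin]
    · -- s ≤ hi
      have hsm : s ≤ m := not_lt.mp hms
      have hmax : max m s = m := max_eq_left hsm
      have hmM : m ≤ t.foldl max m := le_foldl_max t m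
      -- state after the step is (some m, some w) for some w ≤ m with s ≤ w,
      -- and pvFin (some m, some w) = pvFin-old && decide (s < m)
      obtain ⟨w, hw, hwm, hsw, hfin⟩ :
          ∃ w, pvStepB (some m, lo) s = (some m, some w) ∧ w ≤ m ∧ s ≤ w ∧
            (decide (w < m) = (pvFin (some m, lo) && decide (s ≠ m))) := by
        match lo with
        | none =>
          exact ⟨s, by simp [pvStepB, hms], hsm, le_refl s, by
            simp only [pvFin]; rw [Bool.eq_iff_iff]; simp; omega⟩
        | some v =>
          have hvm := hlo v rfl
          by_cases hvs : v < s
          · exact ⟨s, by simp [pvStepB, hms, hvs], hsm, le_refl s, by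
              simp only [pvFin]; rw [Bool.eq_iff_iff]; simp; omega⟩
          · exact ⟨v, by simp [pvStepB, hms, hvs], hvm, not_lt.mp hvs, by
              simp only [pvFin]; rw [Bool.eq_iff_iff]; simp; omega⟩
      rw [List.foldl_cons, hw, ih m (some w) (by intro v hv; cases hv; exact hwm),
          List.foldl_cons, hmax]
      by_cases hmM' : m < t.foldl max m
      · have hne : s ≠ t.foldl max m := ne_of_lt (lt_of_le_of_lt hsm hmM')
        simp [hmM', hne]
      · have heq : t.foldl max m = m := le_antisymm (not_lt.mp hmM') hmM
        rw [if_neg hmM', if_neg hmM']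
        simp only [pvFin]
        rw [hfin]
        by_cases hsm' : s = m
        · simp [hsm']
        · have e1 : (m == s) = false := by simp [Ne.symm hsm']
          have e2 : (s == m) = false := by simp [hsm']
          simp [hsm']
          rfl

-- the max is in the list, so its count is positive
lemma count_max_pos (x : Int) (t : List Int) :
    1 ≤ (x :: t).count ((x :: t).foldl max x) := by
  have hmem : (t.foldl max x) ∈ x :: t := by
    have h := PySem.List.max?_mem (xs := x :: t) (key := fun y => y) (m := t.foldl max x)
    exact h (by rw [PySem.List.max?_id_cons])
  simpa [List.foldl_cons, max_self] using List.count_pos_iff.mpr hmem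

-- ===== VERDICT (by name: the statement is the Claim_ definition above) =====
theorem find_single_max_exists_spec : Claim_equal_find_single_max_exists := by
  intro score_list _ hpre
  unfold Spec_find_single_max_exists
  match score_list with
  | [] => exact absurd rfl hpre
  | x :: t =>
    have hA : find_single_max_exists (x :: t)
        = decide (((x :: t).count (t.foldl max x) : Int) ≤ 1) := by
      unfold find_single_max_exists
      rw [PySem.List.max?_id_cons]
      simp only [countA_eq]
      by_cases h : (1 : Int) < 0 + ((x :: t).count (t.foldl max x) : Int)
      · rw [if_pos h]; symm; simp; omega
      · rw [if_neg h]; symm; simp; omega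
    have hB : find_single_max_exists_alt (x :: t)
        = pvFin ((x :: t).foldl pvStepB (none, none)) := by
      unfold find_single_max_exists_alt
      rcases hfold : (x :: t).foldl pvStepB (none, none) with ⟨hi, lo⟩
      cases hi <;> cases lo <;> simp [pvFin]
    rw [hA, hB]
    have hstep0 : pvStepB (none, none) x = (some x, none) := by simp [pvStepB]
    rw [List.foldl_cons, hstep0, loopB t x none (by intro v hv; cases hv)]
    have hxM : x ≤ t.foldl max x := le_foldl_max t x
    have hcnt : 1 ≤ (x :: t).count ((x :: t).foldl max x) := count_max_pos x t
    simp only [List.foldl_cons, max_self] at hcnt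
    by_cases hlt : x < t.foldl max x
    · have hne : x ≠ t.foldl max x := ne_of_lt hlt
      rw [if_pos hlt]
      have e1 : (x == t.foldl max x) = false := by simp [hne]
      have e2 : (t.foldl max x == x) = false := by simp [Ne.symm hne]
      simp [List.count_cons, e1] at hcnt
      rw [Bool.eq_iff_iff]
      simp [List.count_cons, e1]
      have := List.count_pos_iff.mpr hcnt
      omega
    · have heq : t.foldl max x = x := le_antisymm (not_lt.mp hlt) hxM
      rw [if_neg hlt]
      simp only [pvFin, Bool.true_and, heq, List.count_cons_self] at *
      rw [Bool.eq_iff_iff]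
      simp
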